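-- pv_equiv track=rewrite | github.com/CommanderChuter/gtsam | wrap/gtwrap/rust_wrapper/rust_wrapper.py | pretty_brackets
-- ===== SOURCE A (Python) =====
-- def pretty_brackets(input: str) -> str:
--     output = ""
--     tab = 0
--     for line in input.splitlines():
--         if line.count("}"):
--             tab -= line.count("}")
--         output += (("\t"*tab)+line+"\n")
--         if line.count("{"):
--             tab += line.count("{")
--     return output
-- ===== SOURCE B (Python) =====
-- def pretty_brackets(input: str) -> str:
--     lines = input.splitlines()
--     deltas = [ln.count("{") - ln.count("}") for ln in lines]
--     depths = []
--     d = 0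
--     for x in deltas:
--         depths.append(d)
--         d += x
--     pieces = ["\t" * (depth - ln.count("}")) + ln + "\n"
--               for depth, ln in zip(depths, lines)]
--     return "".join(pieces)
-- ===== Notes on version B (the rewrite author's own statement) =====
-- stated objective: alternative
-- what changed: Replaced the single stateful loop that mutates a tab counter and grows the output string by repeated concatenation with a two-phase pipeline: first a prefix-sum of per-line brace deltas yielding the entering depth of every line, then one join over pieces built from (depth, line) pairs.
import Mathlib
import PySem

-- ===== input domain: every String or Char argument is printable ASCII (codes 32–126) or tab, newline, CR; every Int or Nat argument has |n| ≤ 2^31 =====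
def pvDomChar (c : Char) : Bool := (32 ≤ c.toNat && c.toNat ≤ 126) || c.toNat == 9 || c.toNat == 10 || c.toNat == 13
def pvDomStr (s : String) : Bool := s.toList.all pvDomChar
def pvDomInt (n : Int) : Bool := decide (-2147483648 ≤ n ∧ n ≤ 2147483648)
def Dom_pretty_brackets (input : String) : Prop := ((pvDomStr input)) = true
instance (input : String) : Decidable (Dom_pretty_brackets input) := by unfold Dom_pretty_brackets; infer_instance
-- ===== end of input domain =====

-- B replaces A's stateful accumulate-into-one-string loop by a prefix-sum of brace deltas followed by one join (objective: alternative decomposition, same values).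

-- ===== PORT A =====
-- "\t" * n  (Python string repetition; '' for n ≤ 0)
def pyTabs (n : Int) : List Char := PySem.List.pyRepeat ['\t'] n

def pretty_brackets (input : String) : String :=
  let r := (PySem.Str.splitlines input).foldl
    (fun (st : List Char × Int) line =>
      let tab := if PySem.Str.count line "}" ≠ 0 then st.2 - (PySem.Str.count line "}" : Int) else st.2
      let out := st.1 ++ pyTabs tab ++ line.toList ++ ['\n']
      let tab := if PySem.Str.count line "{" ≠ 0 then tab + (PySem.Str.count line "{" : Int) else tab
      (out, tab)) ([], 0)
  String.ofList r.1

-- ===== PORT B =====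
def pretty_brackets_alt (input : String) : String :=
  let lines := PySem.Str.splitlines input
  let deltas := lines.map (fun ln => (PySem.Str.count ln "{" : Int) - (PySem.Str.count ln "}" : Int))
  let depths := (deltas.foldl (fun (st : List Int × Int) x => (st.1 ++ [st.2], st.2 + x)) ([], 0)).1
  let pieces := (List.zip depths lines).map
    (fun p => pyTabs (p.1 - (PySem.Str.count p.2 "}" : Int)) ++ p.2.toList ++ ['\n'])
  String.ofList pieces.flatten

-- ===== PRECONDITION & SPEC =====
def Spec_pretty_brackets (input : String) (out : String) : Prop := out = pretty_brackets_alt input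
instance (input : String) (out : String) : Decidable (Spec_pretty_brackets input out) := by unfold Spec_pretty_brackets; infer_instance

-- ===== CLAIM (what is proved, stated in full; the proofs are below) =====
def Claim_equal_pretty_brackets : Prop := ∀ (input : String), Dom_pretty_brackets input → Spec_pretty_brackets input (pretty_brackets input)

-- ===== LEMMAS AND PROOFS =====

-- shared characterisation of the output as a function of the entering depth
def pvRender (d : Int) : List String → List Char
  | [] => []
  | l :: ls =>
      pyTabs (d - (PySem.Str.count l "}" : Int)) ++ l.toList ++ ['\n'] ++
        pvRender (d + ((PySem.Str.count l "{" : Int) - (PySem.Str.count l "}" : Int))) ls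

lemma pvA_foldl (ls : List String) (out : List Char) (d : Int) :
    (ls.foldl
      (fun (st : List Char × Int) line =>
        let tab := if PySem.Str.count line "}" ≠ 0 then st.2 - (PySem.Str.count line "}" : Int) else st.2
        let out := st.1 ++ pyTabs tab ++ line.toList ++ ['\n']
        let tab := if PySem.Str.count line "{" ≠ 0 then tab + (PySem.Str.count line "{" : Int) else tab
        (out, tab)) (out, d)).1 = out ++ pvRender d ls := by
  induction ls generalizing out d with
  | nil => simp [pvRender]
  | cons l ls ih =>
      simp only [List.foldl_cons, pvRender]
      have hc : (if PySem.Str.count l "}" ≠ 0 then d - (PySem.Str.count l "}" : Int) else d)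
          = d - (PySem.Str.count l "}" : Int) := by
        split_ifs with h
        · rfl
        · simp at h; simp [h]
      have ho : ∀ t : Int, (if PySem.Str.count l "{" ≠ 0 then t + (PySem.Str.count l "{" : Int) else t)
          = t + (PySem.Str.count l "{" : Int) := by
        intro t; split_ifs with h
        · rfl
        · simp at h; simp [h]
      simp only [hc, ho, ih]
      have : d - (PySem.Str.count l "}" : Int) + (PySem.Str.count l "{" : Int)
          = d + ((PySem.Str.count l "{" : Int) - (PySem.Str.count l "}" : Int)) := by ring
      rw [this]
      simp [List.append_assoc]

-- the depths list computed by B's fold, in closed recursive form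
def pvDepths (d : Int) : List Int → List Int
  | [] => []
  | x :: xs => d :: pvDepths (d + x) xs

lemma pvB_depths (ds : List Int) (acc : List Int) (d : Int) :
    (ds.foldl (fun (st : List Int × Int) x => (st.1 ++ [st.2], st.2 + x)) (acc, d)).1
      = acc ++ pvDepths d ds := by
  induction ds generalizing acc d with
  | nil => simp [pvDepths]
  | cons x xs ih => simp [pvDepths, ih]

lemma pvB_pieces (ls : List String) (d : Int) :
    ((List.zip (pvDepths d (ls.map (fun ln => (PySem.Str.count ln "{" : Int) - (PySem.Str.count ln "}" : Int)))) ls).map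
      (fun p => pyTabs (p.1 - (PySem.Str.count p.2 "}" : Int)) ++ p.2.toList ++ ['\n'])).flatten
      = pvRender d ls := by
  induction ls generalizing d with
  | nil => simp [pvDepths, pvRender]
  | cons l ls ih =>
      simp only [List.map_cons, pvDepths, List.zip_cons_cons, List.flatten_cons, ih, pvRender]

-- ===== VERDICT (by name: the statement is the Claim_ definition above) =====
theorem pretty_brackets_spec : Claim_equal_pretty_brackets := by
  intro input _
  show pretty_brackets input = pretty_brackets_alt input
  unfold pretty_brackets pretty_brackets_alt
  simp only [pvA_foldl, pvB_depths, pvB_pieces, List.nil_append]
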